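-- pv_equiv track=rewrite | github.com/shruthi-22/dm | vertical.py | itemSet
-- ===== SOURCE A (Python) =====
-- from itertools import combinations
--
-- def joinOperation(item_set1, item_set2):
--     if (len(item_set1)==1 and len(item_set2)==1):
--
--         return item_set1+item_set2
--     elif(item_set1[:-1] == item_set2[:-1]):
--
--         item_set_string = item_set1 + item_set2[-1]
--         return "".join(sorted(item_set_string))
--     else:
--         return ""
--
-- def intersection(trans_item_set1, trans_item_set2):
--     return [value for value in trans_item_set1 if value in trans_item_set2]
--
-- def itemSet ( trans_db, item_set, min_supp):
--     if(item_set==1):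
--         item_set = {}
--         for i in trans_db:
--             for j in trans_db[i]:
--                 if j not in item_set:
--                     item_set[j] = []
--                 item_set[j].append(i)
--         temp = {}
--         for i in item_set:
--             if len(item_set[i])>=min_supp:
--                 temp[i] = item_set[i]
--
--         item_set = dict(sorted(temp.items()))
--         return item_set
--     else:
--         item_set = {}
--         temp = combinations(trans_db.keys(), 2)
--         for i in list(temp):
--             item_set_string = joinOperation(i[0],i[1])
--             if(item_set_string!=""):
--                 intersection_trans = intersection(trans_db[i[0]], trans_db[i[1]])
--                 if(len(intersection_trans)>=min_supp):
--                     item_set[item_set_string] = intersection_trans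
--         return item_set
-- ===== SOURCE B (Python) =====
-- def itemSet(trans_db, item_set, min_supp):
--     if item_set == 1:
--         item_set = {}
--         for i in trans_db:
--             for j in trans_db[i]:
--                 if j not in item_set:
--                     item_set[j] = []
--                 item_set[j].append(i)
--         temp = {}
--         for i in item_set:
--             if len(item_set[i]) >= min_supp:
--                 temp[i] = item_set[i]
--         return dict(sorted(temp.items()))
--     # group the keys by their prefix key[:-1]; only same-prefix pairs can join,
--     # so pair each key with the later members of its own group
--     groups = {}
--     for k in trans_db:
--         groups.setdefault(k[:-1], []).append(k)
--     result = {}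
--     for k in trans_db:
--         grp = groups[k[:-1]]
--         for other in grp[grp.index(k) + 1:]:
--             name = k + other if k[:-1] == "" else "".join(sorted(k + other[-1]))
--             tids = [t for t in trans_db[k] if t in trans_db[other]]
--             if len(tids) >= min_supp:
--                 result[name] = tids
--     return result
-- ===== Notes on version B (the rewrite author's own statement) =====
-- stated objective: faster
-- what changed: Instead of scanning all O(n^2) key pairs with combinations(keys,2) and discarding the cross-prefix ones whose join is empty, B builds a dict grouping the keys by their prefix k[:-1] in one pass and only pairs each key with the later members of its own prefix group; group '' (the singleton items) joins by plain concatenation, other groups by sorted concatenation, reproducing A's insertion order exactly.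
import Mathlib
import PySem

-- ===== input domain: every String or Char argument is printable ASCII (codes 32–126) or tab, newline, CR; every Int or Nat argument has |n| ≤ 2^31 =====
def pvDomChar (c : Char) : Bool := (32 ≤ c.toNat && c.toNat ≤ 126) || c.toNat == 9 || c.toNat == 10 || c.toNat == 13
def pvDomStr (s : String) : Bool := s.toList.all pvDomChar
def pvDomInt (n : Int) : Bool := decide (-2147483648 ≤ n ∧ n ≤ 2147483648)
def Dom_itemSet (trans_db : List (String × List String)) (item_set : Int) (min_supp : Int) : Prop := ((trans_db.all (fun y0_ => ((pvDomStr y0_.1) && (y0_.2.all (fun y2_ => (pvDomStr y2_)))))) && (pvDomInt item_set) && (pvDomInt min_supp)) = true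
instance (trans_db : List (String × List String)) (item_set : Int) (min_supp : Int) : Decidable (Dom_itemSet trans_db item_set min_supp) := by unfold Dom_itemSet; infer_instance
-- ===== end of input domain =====

-- B builds a prefix→keys index once and pairs each key only with the later members of
-- its own prefix group (cross-prefix pairs can never join), instead of scanning all O(n²) key pairs.

-- ===== PORT A =====
-- helper for the expression s[:-1] (used by both ports)
def pfx (s : String) : String := PySem.Str.slice s none (some (-1))

def joinOperation (item_set1 item_set2 : String) : String :=
  if PySem.Str.len item_set1 = 1 ∧ PySem.Str.len item_set2 = 1 then
    String.ofList (item_set1.toList ++ item_set2.toList)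
  else if pfx item_set1 = pfx item_set2 then
    -- item_set1 + item_set2[-1], then "".join(sorted(…)); item_set2[-1] raises IndexError on
    -- an empty item_set2 — exactly the inputs Pre_itemSet excludes (the 'none' arm)
    match PySem.Str.pyGet? item_set2 (-1) with
    | some c => String.ofList (PySem.List.sorted (item_set1.toList ++ [c]) (fun c => c) false)
    | none => ""
  else ""

def intersectionP (trans_item_set1 trans_item_set2 : List String) : List String :=
  trans_item_set1.filter (fun value => decide (value ∈ trans_item_set2))

-- the item_set == 1 branch (Source B keeps this branch verbatim, so both ports share it)
def singletonPass (trans_db : List (String × List String)) (min_supp : Int) :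
    List (String × List String) :=
  let db := PySem.Dict.mk trans_db
  let idx := db.keys.foldl
    (fun d i => (db.getD i []).foldl
      (fun d j =>
        let d := if d.contains j then d else d.insert j ([] : List String)
        d.modify j [] (fun l => l ++ [i])) d)
    PySem.Dict.empty
  let temp := idx.keys.foldl
    (fun t i => if min_supp ≤ ((idx.getD i []).length : Int) then t.insert i (idx.getD i []) else t)
    PySem.Dict.empty
  -- dict keys are distinct, so Python's tuple sort on items orders by the key alone
  PySem.List.sorted temp.items (fun p => p.1) false

-- loop body of A's pair loop (every element of combinations keys 2 has exactly two elements)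
def pairStep (db : PySem.Dict String (List String)) (min_supp : Int)
    (d : PySem.Dict String (List String)) (c : List String) : PySem.Dict String (List String) :=
  match c with
  | [a, b] =>
    let s := joinOperation a b
    if s ≠ "" then
      let inter := intersectionP (db.getD a []) (db.getD b [])
      if min_supp ≤ (inter.length : Int) then d.insert s inter else d
    else d
  | _ => d

def itemSet (trans_db : List (String × List String)) (item_set : Int) (min_supp : Int) :
    List (String × List String) :=
  if item_set = 1 then singletonPass trans_db min_supp
  else
    let db := PySem.Dict.mk trans_db
    ((PySem.List.combinations db.keys 2).foldl (pairStep db min_supp) PySem.Dict.empty).items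

-- ===== PORT B =====
-- groups.setdefault(k[:-1], []).append(k) over all keys
def buildGroups (keys : List String) : PySem.Dict String (List String) :=
  keys.foldl
    (fun g k => (g.setdefault (pfx k) ([] : List String)).modify (pfx k) [] (fun l => l ++ [k]))
    PySem.Dict.empty

-- loop body of B's key loop: pair k with the later members of its own prefix group
def groupStep (db : PySem.Dict String (List String)) (min_supp : Int)
    (groups : PySem.Dict String (List String)) (d : PySem.Dict String (List String))
    (k : String) : PySem.Dict String (List String) :=
  let grp := groups.getD (pfx k) []
  let tail := PySem.List.slice grp (some (((PySem.List.index? grp k).getD 0 : Int) + 1)) none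
  tail.foldl
    (fun d other =>
      let name :=
        if pfx k = "" then String.ofList (k.toList ++ other.toList)
        else
          -- members of a group with pfx k ≠ "" are nonempty, so the 'none' arm is unreachable
          match PySem.Str.pyGet? other (-1) with
          | some c => String.ofList (PySem.List.sorted (k.toList ++ [c]) (fun c => c) false)
          | none => ""
      let tids := (db.getD k []).filter (fun t => decide (t ∈ db.getD other []))
      if min_supp ≤ (tids.length : Int) then d.insert name tids else d)
    d

def itemSet_alt (trans_db : List (String × List String)) (item_set : Int) (min_supp : Int) :
    List (String × List String) :=
  if item_set = 1 then singletonPass trans_db min_supp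
  else
    let db := PySem.Dict.mk trans_db
    let groups := buildGroups db.keys
    (db.keys.foldl (groupStep db min_supp groups) PySem.Dict.empty).items

-- ===== PRECONDITION & SPEC =====
-- Pre_ requires distinct keys (trans_db encodes a Python dict, which cannot hold duplicate
-- keys), and excludes the inputs where A raises IndexError: item_set ≠ 1 with a key "" coming
-- after a key of length ≤ 1 (joinOperation then evaluates ""[-1]).
def Pre_itemSet (trans_db : List (String × List String)) (item_set : Int) (min_supp : Int) : Prop :=
  (trans_db.map Prod.fst).Nodup ∧
  (item_set = 1 ∨
    (trans_db.map Prod.fst).Pairwise (fun a b => ¬ (a.toList.length ≤ 1 ∧ b = "")))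
instance (trans_db : List (String × List String)) (item_set : Int) (min_supp : Int) :
    Decidable (Pre_itemSet trans_db item_set min_supp) := by unfold Pre_itemSet; infer_instance

def pvWitness_itemSet : (List (String × List String)) × Int × Int :=
  ([("ab", ["1", "2"]), ("ac", ["2"]), ("x", ["1"])], 2, 1)

def Spec_itemSet (trans_db : List (String × List String)) (item_set : Int) (min_supp : Int)
    (out : List (String × List String)) : Prop := out = itemSet_alt trans_db item_set min_supp
instance (trans_db : List (String × List String)) (item_set : Int) (min_supp : Int)
    (out : List (String × List String)) : Decidable (Spec_itemSet trans_db item_set min_supp out) := by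
  unfold Spec_itemSet; infer_instance

-- ===== CLAIM (what is proved, stated in full; the proofs are below) =====
def Claim_equal_itemSet : Prop := ∀ (trans_db : List (String × List String)) (item_set : Int) (min_supp : Int), Dom_itemSet trans_db item_set min_supp → Pre_itemSet trans_db item_set min_supp → Spec_itemSet trans_db item_set min_supp (itemSet trans_db item_set min_supp)

-- ===== LEMMAS AND PROOFS =====

theorem dropLast_nil_iff {α : Type} (l : List α) : l.dropLast = [] ↔ l.length ≤ 1 := by
  rcases l with _ | ⟨a, _ | ⟨b, t⟩⟩ <;> simp [List.dropLast]

theorem pfx_toList (s : String) : (pfx s).toList = s.toList.dropLast :=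
  PySem.Str.slice_to_neg_one s

theorem pfx_eq_empty_iff (s : String) : pfx s = "" ↔ s.toList.length ≤ 1 := by
  rw [String.ext_iff, pfx_toList, show ("" : String).toList = [] from rfl]
  exact dropLast_nil_iff _

theorem strlen_one_iff (s : String) : PySem.Str.len s = 1 ↔ s.toList.length = 1 := by
  rw [PySem.Str.len_eq_length, ← String.length_toList]
  omega

theorem setdefault_modify (g : PySem.Dict String (List String)) (p : String)
    (f : List String → List String) :
    (g.setdefault p []).modify p [] f = g.modify p [] f := by
  by_cases h : g.contains p
  · rw [PySem.Dict.setdefault_of_contains g [] h]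
  · rw [PySem.Dict.setdefault_of_not_contains g [] (by simpa using h)]
    show (g.insert p []).insert p (f ((g.insert p []).getD p [])) = g.insert p (f (g.getD p []))
    rw [PySem.Dict.getD_insert_self, PySem.Dict.insert_insert_self,
      PySem.Dict.getD_of_not_contains g [] (by simpa using h)]

theorem groups_getD (keys : List String) (c : String) :
    (buildGroups keys).getD c [] = keys.filter (fun k => pfx k == c) := by
  have h1 : buildGroups keys = (keys.map (fun k => (pfx k, k))).foldl
      (fun d p => d.modify p.1 [] (fun l => l ++ [p.2])) PySem.Dict.empty := by
    rw [List.foldl_map]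
    exact PySem.List.foldl_congr_mem _ _ _ _ (fun acc k _ => setdefault_modify acc (pfx k) _)
  rw [h1, PySem.Dict.getD_foldl_modify_append, List.filter_map]
  simp [Function.comp_def]

theorem join_of_pfx_ne {x y : String} (h : pfx x ≠ pfx y) : joinOperation x y = "" := by
  unfold joinOperation
  have hc : ¬ (PySem.Str.len x = 1 ∧ PySem.Str.len y = 1) := by
    rintro ⟨h1, h2⟩
    exact h (((pfx_eq_empty_iff x).mpr (by rw [(strlen_one_iff x).mp h1])).trans
      ((pfx_eq_empty_iff y).mpr (by rw [(strlen_one_iff y).mp h2])).symm)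
  rw [if_neg hc, if_neg h]

theorem join_of_pfx_eq {x y : String} (h : pfx y = pfx x)
    (hnb : ¬ (x.toList.length ≤ 1 ∧ y = "")) :
    joinOperation x y =
      (if pfx x = "" then String.ofList (x.toList ++ y.toList)
       else match PySem.Str.pyGet? y (-1) with
            | some c => String.ofList (PySem.List.sorted (x.toList ++ [c]) (fun c => c) false)
            | none => "") ∧ joinOperation x y ≠ "" := by
  by_cases hp : pfx x = ""
  · have hx1 : x.toList.length ≤ 1 := (pfx_eq_empty_iff x).mp hp
    have hy1 : y.toList.length ≤ 1 := (pfx_eq_empty_iff y).mp (by rw [h, hp])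
    have hyne : y ≠ "" := fun he => hnb ⟨hx1, he⟩
    have hynil : y.toList ≠ [] := by
      intro hnil
      exact hyne (by rw [String.ext_iff, hnil]; rfl)
    have hylen : y.toList.length = 1 := by
      have := List.length_pos_of_ne_nil hynil; omega
    by_cases hx : x.toList.length = 1
    · have hcond : PySem.Str.len x = 1 ∧ PySem.Str.len y = 1 :=
        ⟨(strlen_one_iff x).mpr hx, (strlen_one_iff y).mpr hylen⟩
      unfold joinOperation
      rw [if_pos hcond, if_pos hp]
      refine ⟨rfl, ?_⟩
      intro he
      rw [String.ext_iff, String.toList_ofList, show ("" : String).toList = [] from rfl] at he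
      simp at he
      rw [he.1] at hx
      simp at hx
    · obtain ⟨c, hc⟩ := List.length_eq_one_iff.mp hylen
      have hx0 : x.toList = [] := by
        have : x.toList.length = 0 := by omega
        simpa using this
      have hcond : ¬ (PySem.Str.len x = 1 ∧ PySem.Str.len y = 1) := by
        rintro ⟨h1, _⟩
        have := (strlen_one_iff x).mp h1; omega
      have hget : PySem.Str.pyGet? y (-1) = some c := by
        have hg : PySem.Str.pyGet? y (-1) = y.toList.getLast? := by
          simp [PySem.List.pyGet?_neg_one]
        rw [hg, hc]; rfl
      unfold joinOperation
      rw [if_neg hcond, if_pos (show pfx x = pfx y from h.symm), hget, if_pos hp, hx0, hc]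
      constructor
      · show String.ofList (PySem.List.sorted ([] ++ [c]) (fun c => c) false)
            = String.ofList ([] ++ [c])
        rw [List.nil_append, PySem.List.sorted_eq_self_of_pairwise [c] (fun c => c) (by simp)]
      · show String.ofList (PySem.List.sorted ([] ++ [c]) (fun c => c) false) ≠ ""
        rw [List.nil_append, PySem.List.sorted_eq_self_of_pairwise [c] (fun c => c) (by simp)]
        intro he
        rw [String.ext_iff, String.toList_ofList, show ("" : String).toList = [] from rfl] at he
        simp at he
  · have hx2 : ¬ x.toList.length ≤ 1 := fun hle => hp ((pfx_eq_empty_iff x).mpr hle)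
    have hy2 : ¬ y.toList.length ≤ 1 := fun hle =>
      hp ((h.symm.trans ((pfx_eq_empty_iff y).mpr hle)))
    have hynil : y.toList ≠ [] := fun hnil => hy2 (by rw [hnil]; simp)
    have hget : PySem.Str.pyGet? y (-1) = some (y.toList.getLast hynil) := by
      have hg : PySem.Str.pyGet? y (-1) = y.toList.getLast? := by
        simp [PySem.List.pyGet?_neg_one]
      rw [hg]
      exact List.getLast?_eq_some_getLast hynil
    have hcond : ¬ (PySem.Str.len x = 1 ∧ PySem.Str.len y = 1) := by
      rintro ⟨h1, _⟩
      have := (strlen_one_iff x).mp h1; omega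
    unfold joinOperation
    rw [if_neg hcond, if_pos (show pfx x = pfx y from h.symm), hget, if_neg hp]
    refine ⟨rfl, ?_⟩
    intro he
    rw [String.ext_iff, String.toList_ofList, show ("" : String).toList = [] from rfl] at he
    have hlen := (PySem.List.sorted_perm (x.toList ++ [y.toList.getLast hynil])
      (fun c => c) false).length_eq
    rw [he] at hlen
    simp at hlen

theorem inner_eq (db : PySem.Dict String (List String)) (ms : Int)
    (keys pre t : List String) (x : String) (d : PySem.Dict String (List String))
    (hk : keys = pre ++ x :: t) (hnd : keys.Nodup)
    (hnb : ∀ y ∈ t, ¬ (x.toList.length ≤ 1 ∧ y = "")) :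
    groupStep db ms (buildGroups keys) d x =
      t.foldl (fun d y => pairStep db ms d [x, y]) d := by
  have hgrp : (buildGroups keys).getD (pfx x) [] =
      pre.filter (fun k => pfx k == pfx x) ++ x :: t.filter (fun k => pfx k == pfx x) := by
    rw [groups_getD, hk, List.filter_append, List.filter_cons]
    simp
  have hxnotin : x ∉ pre := by
    rw [hk] at hnd
    have := List.nodup_middle.mp hnd
    simp at this
    tauto
  have hidx : PySem.List.index? ((buildGroups keys).getD (pfx x) []) x
      = some (pre.filter (fun k => pfx k == pfx x)).length := by
    rw [hgrp, PySem.List.index?_eq_some_iff]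
    exact ⟨_, _, rfl, rfl, fun hmem => hxnotin (List.mem_of_mem_filter hmem)⟩
  have htail : PySem.List.slice ((buildGroups keys).getD (pfx x) [])
      (some (((PySem.List.index? ((buildGroups keys).getD (pfx x) []) x).getD 0 : Int) + 1)) none
      = t.filter (fun k => pfx k == pfx x) := by
    rw [hidx]
    rw [show (((some (pre.filter (fun k => pfx k == pfx x)).length).getD 0 : Int) + 1)
        = (((pre.filter (fun k => pfx k == pfx x)).length + 1 : Nat) : Int) by
      simp]
    rw [PySem.List.slice_from_natCast, hgrp]
    rw [show pre.filter (fun k => pfx k == pfx x) ++ x :: t.filter (fun k => pfx k == pfx x)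
        = (pre.filter (fun k => pfx k == pfx x) ++ [x]) ++ t.filter (fun k => pfx k == pfx x) by
      simp]
    rw [show (pre.filter (fun k => pfx k == pfx x)).length + 1
        = (pre.filter (fun k => pfx k == pfx x) ++ [x]).length by simp]
    exact List.drop_left
  show (PySem.List.slice ((buildGroups keys).getD (pfx x) [])
      (some (((PySem.List.index? ((buildGroups keys).getD (pfx x) []) x).getD 0 : Int) + 1))
      none).foldl _ d = _
  rw [htail, ← PySem.List.foldl_if_eq_foldl_filter (fun k => pfx k == pfx x) _ t d]
  refine PySem.List.foldl_congr_mem t _ _ d (fun acc y hy => ?_)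
  by_cases hp : pfx y = pfx x
  · obtain ⟨hj, hne⟩ := join_of_pfx_eq hp (hnb y hy)
    rw [if_pos (by simpa using hp)]
    show _ = pairStep db ms acc [x, y]
    simp only [pairStep, intersectionP]
    rw [hj] at hne ⊢
    rw [if_pos hne]
  · rw [if_neg (by simpa using hp)]
    show acc = pairStep db ms acc [x, y]
    simp only [pairStep]
    rw [join_of_pfx_ne (fun he => hp he.symm)]
    simp

theorem main_fold (db : PySem.Dict String (List String)) (min_supp : Int)
    (keys : List String) (hnd : keys.Nodup)
    (hnb : keys.Pairwise (fun a b => ¬ (a.toList.length ≤ 1 ∧ b = ""))) :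
    ∀ (rest pre : List String) (d : PySem.Dict String (List String)),
      keys = pre ++ rest →
      (PySem.List.combinations rest 2).foldl (pairStep db min_supp) d =
        rest.foldl (groupStep db min_supp (buildGroups keys)) d := by
  intro rest
  induction rest with
  | nil =>
    intro pre d hk
    rw [show (2 : Nat) = 1 + 1 from rfl, PySem.List.combinations_nil_succ]
    rfl
  | cons x t ih =>
    intro pre d hk
    have hnbx : ∀ y ∈ t, ¬ (x.toList.length ≤ 1 ∧ y = "") := by
      rw [hk] at hnb
      exact (List.pairwise_cons.mp (List.pairwise_append.mp hnb).2.1).1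
    rw [show (2 : Nat) = 1 + 1 from rfl, PySem.List.combinations_cons_succ,
      List.foldl_append, PySem.List.combinations_one, List.map_map, List.foldl_map,
      List.foldl_cons]
    have hx := inner_eq db min_supp keys pre t x d hk hnd hnbx
    have hcomp : t.foldl
        (fun d y => pairStep db min_supp d (((fun c => x :: c) ∘ fun y => [y]) y)) d
        = t.foldl (fun d y => pairStep db min_supp d [x, y]) d := rfl
    rw [hcomp, ← hx]
    exact ih (pre ++ [x]) (groupStep db min_supp (buildGroups keys) d x) (by simp [hk])

-- ===== VERDICT (by name: the statement is the Claim_ definition above) =====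
theorem itemSet_spec : Claim_equal_itemSet := by
  intro trans_db item_set min_supp _ hpre
  unfold Spec_itemSet
  rcases hpre with ⟨hnd, hcase⟩
  by_cases h1 : item_set = 1
  · simp only [itemSet, itemSet_alt, if_pos h1]
  · rcases hcase with h | hnb
    · exact absurd h h1
    simp only [itemSet, itemSet_alt, if_neg h1]
    have hkeys : (PySem.Dict.mk trans_db).keys = trans_db.map Prod.fst := rfl
    rw [main_fold (PySem.Dict.mk trans_db) min_supp (PySem.Dict.mk trans_db).keys
      (by rw [hkeys]; exact hnd) (by rw [hkeys]; exact hnb)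
      (PySem.Dict.mk trans_db).keys [] PySem.Dict.empty (by simp)]
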